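-- pv_equiv track=rewrite | github.com/itisha07/Twitter-Sentiment-Analysis | Code/tweet/tweetment.py | _num_contiguous_question_exclaim
-- ===== SOURCE A (Python) =====
-- def _num_contiguous_question_exclaim(tweet):
--   num_q = 0
--   num_e = 0
--   num_qe = 0
--   entered_seq = False
--   mixed = False
--   last_was = ''
--   for c in tweet + ' ': # add an extra space for an extra iteration (hack)
--     if entered_seq:
--       if c != '!' and c != '?':
--         if mixed:
--           num_qe += 1
--         elif last_was == '!':
--           num_e += 1
--         else:
--           num_q += 1
--         entered_seq = False
--         mixed = False
--       elif c != last_was: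
--         mixed = True
--     else:
--       if c == '!' or c == '?':
--         entered_seq = True
--     last_was = c
--   return num_q, num_e, num_qe
-- ===== SOURCE B (Python) =====
-- def _num_contiguous_question_exclaim(tweet):
--     # phase 1: extract every maximal contiguous run of '?'/'!' characters
--     runs = []
--     i = 0
--     n = len(tweet)
--     while i < n:
--         if tweet[i] in '?!':
--             j = i + 1
--             while j < n and tweet[j] in '?!':
--                 j += 1
--             runs.append(tweet[i:j])
--             i = j
--         else:
--             i += 1
--     # phase 2: classify each run
--     num_q = 0
--     num_e = 0
--     num_qe = 0
--     for run in runs: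
--         if '?' in run and '!' in run:
--             num_qe += 1
--         elif '?' not in run:
--             num_e += 1
--         else:
--             num_q += 1
--     return num_q, num_e, num_qe
-- ===== Notes on version B (the rewrite author's own statement) =====
-- stated objective: alternative
-- what changed: Replaces A's one-pass six-variable state machine (with its trailing-space hack) by a two-phase extract-then-classify algorithm: first collect the maximal contiguous '?'/'!' runs, then classify each run by membership ('?' and '!' -> mixed, no '?' -> exclaim, else question).
import Mathlib
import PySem

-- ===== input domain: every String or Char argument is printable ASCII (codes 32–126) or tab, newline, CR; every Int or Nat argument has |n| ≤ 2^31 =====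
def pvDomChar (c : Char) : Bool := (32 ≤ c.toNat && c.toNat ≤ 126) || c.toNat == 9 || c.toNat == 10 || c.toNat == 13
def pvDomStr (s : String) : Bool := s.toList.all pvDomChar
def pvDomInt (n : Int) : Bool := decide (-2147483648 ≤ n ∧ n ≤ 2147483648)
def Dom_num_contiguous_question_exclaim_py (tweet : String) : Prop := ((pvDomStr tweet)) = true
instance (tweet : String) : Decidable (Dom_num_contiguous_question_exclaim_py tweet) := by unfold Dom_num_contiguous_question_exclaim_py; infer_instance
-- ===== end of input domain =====

-- B replaces A's one-pass state machine (with its trailing-space hack) by extract-the-runs-then-classify; alternative, same cost.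

-- ===== PORT A =====
-- state: ((num_q, num_e, num_qe), entered_seq, mixed, last_was); last_was is a Python string, here List Char ('' = [])
def pvStepA : ((Int × Int × Int) × Bool × Bool × List Char) → Char → ((Int × Int × Int) × Bool × Bool × List Char)
  | ((q, e, qe), es, mx, lw), c =>
    if es then
      if c ≠ '!' ∧ c ≠ '?' then
        ((if mx then (q, e, qe + 1) else if lw = ['!'] then (q, e + 1, qe) else (q + 1, e, qe)),
         false, false, [c])
      else if [c] ≠ lw then ((q, e, qe), true, true, [c])
      else ((q, e, qe), true, mx, [c])
    else
      if c = '!' ∨ c = '?' then ((q, e, qe), true, mx, [c])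
      else ((q, e, qe), false, mx, [c])

def num_contiguous_question_exclaim_py (tweet : String) : Int × Int × Int :=
  ((tweet ++ " ").toList.foldl pvStepA ((0, 0, 0), false, false, [])).1

-- ===== PORT B =====
def pvIsQE (c : Char) : Bool := c = '?' || c = '!'

-- phase 1 of Source B: the maximal contiguous runs of '?'/'!'
def pvFindRuns : List Char → List (List Char)
  | [] => []
  | c :: cs =>
    if pvIsQE c then (c :: cs.takeWhile pvIsQE) :: pvFindRuns (cs.dropWhile pvIsQE)
    else pvFindRuns cs
termination_by l => l.length
decreasing_by
  · simp only [List.length_cons]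
    exact Nat.lt_succ_of_le (List.length_dropWhile_le _ _)
  · simp only [List.length_cons]
    exact Nat.lt_succ_of_le le_rfl

-- phase 2 of Source B: classify one run
def pvClassify (acc : Int × Int × Int) (run : List Char) : Int × Int × Int :=
  if run.contains '?' && run.contains '!' then (acc.1, acc.2.1, acc.2.2 + 1)
  else if !(run.contains '?') then (acc.1, acc.2.1 + 1, acc.2.2)
  else (acc.1 + 1, acc.2.1, acc.2.2)

def num_contiguous_question_exclaim_py_alt (tweet : String) : Int × Int × Int :=
  (pvFindRuns tweet.toList).foldl pvClassify (0, 0, 0)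

-- ===== PRECONDITION & SPEC =====
def Spec_num_contiguous_question_exclaim_py (tweet : String) (out : Int × Int × Int) : Prop := out = num_contiguous_question_exclaim_py_alt tweet
instance (tweet : String) (out : Int × Int × Int) : Decidable (Spec_num_contiguous_question_exclaim_py tweet out) := by unfold Spec_num_contiguous_question_exclaim_py; infer_instance

-- ===== CLAIM (what is proved, stated in full; the proofs are below) =====
def Claim_equal_num_contiguous_question_exclaim_py : Prop := ∀ (tweet : String), Dom_num_contiguous_question_exclaim_py tweet → Spec_num_contiguous_question_exclaim_py tweet (num_contiguous_question_exclaim_py tweet)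

-- ===== LEMMAS AND PROOFS =====

lemma pvLast_bang {p : List Char} (hp : p ≠ []) (hall : ∀ c ∈ p, pvIsQE c = true)
    (hq : '?' ∉ p) : p.getLast hp = '!' := by
  have hm := List.getLast_mem hp
  have := hall _ hm
  simp [pvIsQE] at this
  rcases this with h | h
  · exact absurd (h ▸ hm) hq
  · exact h

lemma pvLast_quest {p : List Char} (hp : p ≠ []) (hall : ∀ c ∈ p, pvIsQE c = true)
    (hq : '!' ∉ p) : p.getLast hp = '?' := by
  have hm := List.getLast_mem hp
  have := hall _ hm
  simp [pvIsQE] at this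
  rcases this with h | h
  · exact h
  · exact absurd (h ▸ hm) hq

-- the flush of A's state machine equals B's classification of the consumed run
lemma pvFlush_eq (q e qe : Int) {p : List Char} (hp : p ≠ []) (hall : ∀ c ∈ p, pvIsQE c = true) :
    (if (p.contains '?' && p.contains '!') then (q, e, qe + 1)
     else if [p.getLast hp] = ['!'] then (q, e + 1, qe) else (q + 1, e, qe))
    = pvClassify (q, e, qe) p := by
  unfold pvClassify
  by_cases hq : '?' ∈ p
  · by_cases he : '!' ∈ p
    · simp [List.contains_eq_mem, hq, he]
    · have hl := pvLast_quest hp hall he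
      simp [List.contains_eq_mem, hq, he, hl]
  · have hl := pvLast_bang hp hall hq
    simp [List.contains_eq_mem, hq, hl]

-- extending the run preserves the 'mixed' invariant
lemma pvMixed_step {p : List Char} (hp : p ≠ []) (hall : ∀ c ∈ p, pvIsQE c = true)
    {c : Char} (hc : pvIsQE c = true) :
    (if [c] ≠ [p.getLast hp] then true else (p.contains '?' && p.contains '!'))
    = ((p ++ [c]).contains '?' && (p ++ [c]).contains '!') := by
  have hm := List.getLast_mem hp
  have hsp := hall _ hm
  simp only [pvIsQE, Bool.or_eq_true, decide_eq_true_eq] at hsp hc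
  simp only [List.contains_eq_mem, List.mem_append, List.mem_singleton, ne_eq,
    List.cons.injEq, and_true]
  by_cases hq : '?' ∈ p <;> by_cases he : '!' ∈ p
  · rcases hc with rfl | rfl <;> simp [hq, he]
  · have hl := pvLast_quest hp hall he
    rcases hc with rfl | rfl <;> simp [hq, he, hl]
  · have hl := pvLast_bang hp hall hq
    rcases hc with rfl | rfl <;> simp [hq, he, hl]
  · rcases hsp with h | h
    · exact absurd (h ▸ hm) hq
    · exact absurd (h ▸ hm) he

-- flushes and the nil cases of the main invariant, shared by both induction branches
lemma pvL1_nil (q e qe : Int) (lw : List Char) :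
    ((([] : List Char) ++ [' ']).foldl pvStepA ((q, e, qe), false, false, lw)).1
      = (pvFindRuns []).foldl pvClassify (q, e, qe) := by
  simp [pvStepA, pvFindRuns]

lemma pvL2_nil (q e qe : Int) (p : List Char) (hp : p ≠ []) (hall : ∀ c ∈ p, pvIsQE c = true) :
    ((([] : List Char) ++ [' ']).foldl pvStepA ((q, e, qe), true, (p.contains '?' && p.contains '!'), [p.getLast hp])).1
      = ((p ++ ([] : List Char).takeWhile pvIsQE) :: pvFindRuns (([] : List Char).dropWhile pvIsQE)).foldl pvClassify (q, e, qe) := by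
  have hstep : pvStepA ((q, e, qe), true, (p.contains '?' && p.contains '!'), [p.getLast hp]) ' '
      = ((if (p.contains '?' && p.contains '!') then (q, e, qe + 1)
          else if [p.getLast hp] = ['!'] then (q, e + 1, qe) else (q + 1, e, qe)),
         false, false, [' ']) := by
    simp [pvStepA]
  simp only [List.nil_append, List.foldl_cons, List.foldl_nil, hstep,
    List.takeWhile_nil, List.dropWhile_nil, pvFindRuns, List.append_nil]
  exact pvFlush_eq q e qe hp hall

-- main mutual invariant: idle state (left) and in-seq state with consumed run p (right)
lemma pvMain : ∀ (n : Nat) (l : List Char), l.length ≤ n →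
    (∀ (q e qe : Int) (lw : List Char),
      ((l ++ [' ']).foldl pvStepA ((q, e, qe), false, false, lw)).1
        = (pvFindRuns l).foldl pvClassify (q, e, qe))
    ∧ (∀ (q e qe : Int) (p : List Char) (hp : p ≠ []), (∀ c ∈ p, pvIsQE c = true) →
      ((l ++ [' ']).foldl pvStepA ((q, e, qe), true, (p.contains '?' && p.contains '!'), [p.getLast hp])).1
        = ((p ++ l.takeWhile pvIsQE) :: pvFindRuns (l.dropWhile pvIsQE)).foldl pvClassify (q, e, qe)) := by
  intro n
  induction n with
  | zero =>
    intro l hl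
    have : l = [] := List.length_eq_zero_iff.mp (Nat.le_zero.mp hl)
    subst this
    exact ⟨pvL1_nil, pvL2_nil⟩
  | succ m ih =>
    intro l hl
    match l with
    | [] =>
      exact ⟨pvL1_nil, pvL2_nil⟩
    | c :: cs =>
      have hcs : cs.length ≤ m := Nat.le_of_succ_le_succ hl
      constructor
      · intro q e qe lw
        by_cases hc : pvIsQE c = true
        · have hor : c = '!' ∨ c = '?' := by
            simp [pvIsQE] at hc; tauto
          have step : pvStepA ((q, e, qe), false, false, lw) c = ((q, e, qe), true, false, [c]) := by
            simp [pvStepA, hor]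
          have hmx : (([c]).contains '?' && ([c]).contains '!') = false := by
            rcases hor with rfl | rfl <;> decide
          have hlast : [([c]).getLast (by simp)] = [c] := by simp
          have := (ih cs hcs).2 q e qe [c] (by simp) (by simpa using hc)
          rw [List.cons_append, List.foldl_cons, step]
          rw [hmx] at this
          rw [hlast] at this
          rw [this]
          simp [pvFindRuns, hc]
        · have hne : c ≠ '!' ∧ c ≠ '?' := by
            simp [pvIsQE] at hc; tauto
          have step : pvStepA ((q, e, qe), false, false, lw) c = ((q, e, qe), false, false, [c]) := by
            simp [pvStepA, hne.1, hne.2]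
          rw [List.cons_append, List.foldl_cons, step, (ih cs hcs).1]
          simp [pvFindRuns, hc]
      · intro q e qe p hp hall
        by_cases hc : pvIsQE c = true
        · have hor : c = '!' ∨ c = '?' := by
            simp [pvIsQE] at hc; tauto
          have hnn : ¬ (c ≠ '!' ∧ c ≠ '?') := by tauto
          have step : pvStepA ((q, e, qe), true, (p.contains '?' && p.contains '!'), [p.getLast hp]) c
              = ((q, e, qe), true,
                 (if [c] ≠ [p.getLast hp] then true else (p.contains '?' && p.contains '!')), [c]) := by
            simp only [pvStepA, if_neg hnn]
            by_cases hd : [c] ≠ [p.getLast hp] <;> simp [hd]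
          have hp' : p ++ [c] ≠ [] := by simp
          have hall' : ∀ x ∈ p ++ [c], pvIsQE x = true := by
            intro x hx
            rcases List.mem_append.mp hx with h | h
            · exact hall x h
            · simp at h; subst h; exact hc
          have hlast' : ((p ++ [c]).getLast hp') = c := by
            simp
          have := (ih cs hcs).2 q e qe (p ++ [c]) hp' hall'
          rw [hlast'] at this
          rw [List.cons_append, List.foldl_cons, step, pvMixed_step hp hall hc, this]
          simp [hc, List.append_assoc]
        · have hne : c ≠ '!' ∧ c ≠ '?' := by
            simp [pvIsQE] at hc; tauto
          have step : pvStepA ((q, e, qe), true, (p.contains '?' && p.contains '!'), [p.getLast hp]) c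
              = ((if (p.contains '?' && p.contains '!') then (q, e, qe + 1)
                  else if [p.getLast hp] = ['!'] then (q, e + 1, qe) else (q + 1, e, qe)),
                 false, false, [c]) := by
            simp [pvStepA, hne]
          rw [List.cons_append, List.foldl_cons, step, pvFlush_eq q e qe hp hall]
          have := (ih cs hcs).1 (pvClassify (q, e, qe) p).1 (pvClassify (q, e, qe) p).2.1
            (pvClassify (q, e, qe) p).2.2 [c]
          simp only [Prod.mk.eta] at this
          rw [this]
          simp [hc, pvFindRuns]

-- ===== VERDICT (by name: the statement is the Claim_ definition above) =====
theorem num_contiguous_question_exclaim_py_spec : Claim_equal_num_contiguous_question_exclaim_py := by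
  intro tweet _
  unfold Spec_num_contiguous_question_exclaim_py num_contiguous_question_exclaim_py
    num_contiguous_question_exclaim_py_alt
  have h : (tweet ++ " ").toList = tweet.toList ++ [' '] := by
    simp [String.toList_append]
  rw [h]
  exact (pvMain tweet.toList.length tweet.toList le_rfl).1 0 0 0 []
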